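-- pv_equiv track=rewrite | github.com/jsownz/personal-dictionary | PersonalDictionary.py | alternate_case
-- ===== SOURCE A (Python) =====
-- def alternate_case(term, first):
--     """
--         Change case to alternate_case between lower and upper; if first is true
--         begin with the fist char in caps.
--
--         :param term: string
--         :param first: boolean
--         :return ret: permutation of term with alternating casing on letters
--         :rtype: string
--     """
--     ret = ""
--     for char in term:
--         if first:
--             ret += char.upper()
--         else:
--             ret += char.lower()
--         if char != ' ':
--             first = not first
--     return ret
-- ===== SOURCE B (Python) =====
-- def alternate_case(term, first):
--     # Index-parity over pre-filtered non-space chars, then reinsert spaces.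
--     chars = [c for c in term if c != ' ']
--     cased = [c.upper() if (i % 2 == 1) != first else c.lower()
--              for i, c in enumerate(chars)]
--     it = iter(cased)
--     return ''.join(' ' if c == ' ' else next(it) for c in term)
-- ===== Notes on version B (the rewrite author's own statement) =====
-- stated objective: alternative
-- what changed: Replaces A's running boolean toggle over one pass with three phases: filter out spaces, case each kept char by index parity XOR first, then reinsert spaces while consuming the cased sequence.
import Mathlib
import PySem

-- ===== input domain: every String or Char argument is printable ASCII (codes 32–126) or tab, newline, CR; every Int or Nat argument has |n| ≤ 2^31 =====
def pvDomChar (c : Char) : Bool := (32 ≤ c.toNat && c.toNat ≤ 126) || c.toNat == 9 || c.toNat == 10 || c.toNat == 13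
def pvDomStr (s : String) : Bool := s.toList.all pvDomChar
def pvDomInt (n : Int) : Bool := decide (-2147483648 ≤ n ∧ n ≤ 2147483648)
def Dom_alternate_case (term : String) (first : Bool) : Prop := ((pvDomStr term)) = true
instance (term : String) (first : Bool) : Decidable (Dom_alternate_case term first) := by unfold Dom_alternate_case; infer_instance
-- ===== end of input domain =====

-- B replaces A's running boolean toggle with index-parity casing over the pre-filtered
-- non-space characters plus a space-reinsertion pass (alternative decomposition, same cost).


-- ===== PORT A =====
-- for char in term: ret += char.upper()/char.lower(); toggle first on non-space
def alternate_case (term : String) (first : Bool) : String :=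
  let st := term.toList.foldl
    (fun (st : List Char × Bool) char =>
      (st.1 ++ [if st.2 then PySem.Chars.upperChar char else PySem.Chars.lowerChar char],
       if char != ' ' then !st.2 else st.2))
    ([], first)
  String.mk st.1

-- ===== PORT B =====
-- ''.join(' ' if c == ' ' else next(it) for c in term): consume cased left to right
def pvReassemble : List Char → List Char → List Char
  | [], _ => []
  | c :: cs, cased =>
    if c == ' ' then ' ' :: pvReassemble cs cased
    else match cased with
      | x :: rest => x :: pvReassemble cs rest
      | [] => []   -- unreachable: cased has one entry per non-space char of term

def alternate_case_alt (term : String) (first : Bool) : String :=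
  let chars := term.toList.filter (fun c => c != ' ')
  let cased := (PySem.List.enumerate chars 0).map
    (fun p => if ((p.1 % 2 == 1) != first) then PySem.Chars.upperChar p.2
              else PySem.Chars.lowerChar p.2)
  String.mk (pvReassemble term.toList cased)

-- ===== PRECONDITION & SPEC =====
def Spec_alternate_case (term : String) (first : Bool) (out : String) : Prop := out = alternate_case_alt term first
instance (term : String) (first : Bool) (out : String) : Decidable (Spec_alternate_case term first out) := by unfold Spec_alternate_case; infer_instance

-- ===== CLAIM (what is proved, stated in full; the proofs are below) =====
def Claim_equal_alternate_case : Prop := ∀ (term : String) (first : Bool), Dom_alternate_case term first → Spec_alternate_case term first (alternate_case term first)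

-- ===== LEMMAS AND PROOFS =====

/-- A's loop in recursive form. -/
def aLoop : List Char → Bool → List Char
  | [], _ => []
  | c :: cs, f =>
    (if f then PySem.Chars.upperChar c else PySem.Chars.lowerChar c) ::
      aLoop cs (if c != ' ' then !f else f)

theorem aFold_eq (cs : List Char) (acc : List Char) (f : Bool) :
    cs.foldl
      (fun (st : List Char × Bool) char =>
        (st.1 ++ [if st.2 then PySem.Chars.upperChar char else PySem.Chars.lowerChar char],
         if char != ' ' then !st.2 else st.2)) (acc, f)
    = (acc ++ aLoop cs f, (cs.foldl (fun b c => if c != ' ' then !b else b) f)) := by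
  induction cs generalizing acc f with
  | nil => simp [aLoop]
  | cons c cs ih =>
    rw [List.foldl_cons, ih]
    simp [aLoop]

/-- Alternating case list: upper when the flag is true, flipping each step. -/
def caseList : List Char → Bool → List Char
  | [], _ => []
  | c :: cs, f =>
    (if f then PySem.Chars.upperChar c else PySem.Chars.lowerChar c) :: caseList cs (!f)

theorem cased_eq_caseList (ls : List Char) (s : Int) (f : Bool) (hs : 0 ≤ s) :
    (PySem.List.enumerate ls s).map
      (fun p => if ((p.1 % 2 == 1) != f) then PySem.Chars.upperChar p.2
                else PySem.Chars.lowerChar p.2)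
    = caseList ls ((s % 2 == 1) != f) := by
  induction ls generalizing s with
  | nil => simp [PySem.List.enumerate, caseList]
  | cons c cs ih =>
    rw [PySem.List.enumerate_cons, List.map_cons, ih (s + 1) (by omega), caseList]
    have h2 : ((s + 1) % 2 == 1) = !(s % 2 == 1) := by
      have := Int.emod_emod_of_dvd s (dvd_refl 2)
      rcases Int.emod_two_eq_zero_or_one s with h | h <;>
        simp [Int.add_emod, h]
    rw [h2]
    cases hb : (s % 2 == 1) <;> cases f <;> simp

theorem aLoop_eq_reassemble (cs : List Char) (f : Bool) :
    aLoop cs f = pvReassemble cs (caseList (cs.filter (fun c => c != ' ')) f) := by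
  induction cs generalizing f with
  | nil => simp [aLoop, pvReassemble]
  | cons c cs ih =>
    by_cases hc : c = ' '
    · subst hc
      cases f <;> simp [aLoop, pvReassemble, List.filter, ih, PySem.Chars.upperChar, PySem.Chars.lowerChar, PySem.Chars.isupper, PySem.Chars.islower]
    · have hc' : (c != ' ') = true := by simpa using hc
      simp [aLoop, pvReassemble, List.filter, hc', caseList, hc, ih]

-- ===== VERDICT (by name: the statement is the Claim_ definition above) =====
theorem alternate_case_spec : Claim_equal_alternate_case := by
  intro term first _
  unfold Spec_alternate_case alternate_case alternate_case_alt
  simp only []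
  rw [aFold_eq, cased_eq_caseList _ 0 first (by norm_num)]
  simp [aLoop_eq_reassemble]
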